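-- pv_equiv track=rewrite | github.com/smth2705/StockPulse-Stock-Data-Alerts-via-WhatsApp | app.py | message_creator
-- ===== SOURCE A (Python) =====
-- def message_creator(info, max_length=1599):
--     if not info:
--         return "No stock data available."
--     required_keys = ['longName', 'sector', 'industry', 'marketCap', 'trailingPE']
--     if all(key in info for key in required_keys):
--         m = (
--             f"Company: {info['longName']}\n"
--             f"Sector: {info['sector']}\n"
--             f"Industry: {info['industry']}\n"
--             f"Market Cap: {info['marketCap']}\n"
--             f"P/E Ratio: {info['trailingPE']}"
--         )
--         return m
--     else:
--         lines = []
--         current_length = 0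
--
--         for key, value in info.items():
--             formatted_key = ''.join([' ' + char if char.isupper() else char for char in key]).strip().title()
--             line = f"{formatted_key}: {value}"
--
--             # Check if adding this line exceeds max length
--             if current_length + len(line) + 1 > max_length:  # +1 for newline or space
--                 break
--
--             lines.append(line)
--             current_length += len(line) + 1
--
--         return "\n".join(lines)
-- ===== SOURCE B (Python) =====
-- from itertools import accumulate
--
--
-- def message_creator(info, max_length=1599):
--     if not info:
--         return "No stock data available."
--     required_keys = ['longName', 'sector', 'industry', 'marketCap', 'trailingPE']
--     if all(key in info for key in required_keys):
--         m = (
--             f"Company: {info['longName']}\n"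
--             f"Sector: {info['sector']}\n"
--             f"Industry: {info['industry']}\n"
--             f"Market Cap: {info['marketCap']}\n"
--             f"P/E Ratio: {info['trailingPE']}"
--         )
--         return m
--     else:
--         lines = [
--             f"{''.join(' ' + c if c.isupper() else c for c in key).strip().title()}: {value}"
--             for key, value in info.items()
--         ]
--         # running '\n'-joined length after each line; each step adds len(line)+1 > 0,
--         # so the totals are strictly increasing and counting all totals <= max_length
--         # yields exactly the longest admissible prefix.
--         totals = accumulate(len(line) + 1 for line in lines)
--         n = sum(1 for t in totals if t <= max_length)
--         return "\n".join(lines[:n])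
-- ===== Notes on version B (the rewrite author's own statement) =====
-- stated objective: alternative
-- what changed: The break-on-overflow loop carrying (lines, current_length) state is replaced by mapping all items to formatted lines, computing the running '\n'-joined lengths with itertools.accumulate, and joining the longest prefix whose running total stays <= max_length (equivalent because each increment is positive, so the totals are strictly increasing).
import Mathlib
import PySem

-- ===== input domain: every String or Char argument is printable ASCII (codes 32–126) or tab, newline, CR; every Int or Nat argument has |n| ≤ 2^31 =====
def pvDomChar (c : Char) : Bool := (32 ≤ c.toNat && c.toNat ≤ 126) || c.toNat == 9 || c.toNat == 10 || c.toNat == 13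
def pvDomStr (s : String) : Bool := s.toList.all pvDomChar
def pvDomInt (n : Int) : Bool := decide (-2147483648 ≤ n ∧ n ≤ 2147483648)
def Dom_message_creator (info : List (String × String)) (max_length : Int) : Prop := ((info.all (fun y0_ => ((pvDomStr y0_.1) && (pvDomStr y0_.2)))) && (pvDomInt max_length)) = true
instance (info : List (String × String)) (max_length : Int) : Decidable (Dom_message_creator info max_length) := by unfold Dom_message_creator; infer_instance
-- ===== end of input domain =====

-- B replaces A's break-on-overflow accumulator loop by map-all-lines + running totals +
-- longest-prefix selection (objective: alternative decomposition, same cost).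
-- The dict parameter is modelled as PySem.Dict.ofList of the association list.

-- ===== PORT A =====

-- shared helper: str.title() for ASCII (exact on Dom: only ASCII letters are cased) —
-- a letter after a non-letter is uppercased, a letter after a letter lowercased.
def pyTitleGo : Bool → List Char → List Char
  | _, [] => []
  | prev, c :: cs =>
    (if PySem.Chars.isalpha c then
        (if prev then PySem.Chars.lowerChar c else PySem.Chars.upperChar c)
      else c) :: pyTitleGo (PySem.Chars.isalpha c) cs

def pyTitle (cs : List Char) : List Char := pyTitleGo false cs

-- shared helper: the f-string f"{formatted_key}: {value}" with
-- formatted_key = ''.join(' '+c if c.isupper() else c for c in key).strip().title()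
def fmtLine (key value : String) : List Char :=
  pyTitle (PySem.Chars.strip
      (key.toList.flatMap (fun c => if PySem.Chars.isupper c then [' ', c] else [c])))
    ++ (':' :: ' ' :: value.toList)

-- shared helper: the fast-path f-string (plain ASCII concatenation, exact)
def fixedMsg (d : PySem.Dict String String) : String :=
  "Company: " ++ d.getD "longName" "" ++
  "\nSector: " ++ d.getD "sector" "" ++
  "\nIndustry: " ++ d.getD "industry" "" ++
  "\nMarket Cap: " ++ d.getD "marketCap" "" ++
  "\nP/E Ratio: " ++ d.getD "trailingPE" ""

-- A's for-loop over info.items() with (lines, current_length) state and break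
def loopA (max_length : Int) : List (String × String) → List (List Char) → Int → List (List Char)
  | [], lines, _ => lines
  | (key, value) :: rest, lines, cur =>
    let line := fmtLine key value
    if cur + (line.length : Int) + 1 > max_length then lines
    else loopA max_length rest (lines ++ [line]) (cur + (line.length : Int) + 1)

def message_creator (info : List (String × String)) (max_length : Int) : String :=
  if info.isEmpty then "No stock data available."   -- 'if not info' (dict empty iff list empty)
  else
    let d := PySem.Dict.ofList info
    let required_keys := ["longName", "sector", "industry", "marketCap", "trailingPE"]
    if required_keys.all (fun k => d.contains k) then fixedMsg d
    else String.ofList (PySem.Chars.join ['\n'] (loopA max_length d.items [] 0))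

-- ===== PORT B =====

def message_creator_alt (info : List (String × String)) (max_length : Int) : String :=
  if info.isEmpty then "No stock data available."
  else
    let d := PySem.Dict.ofList info
    let required_keys := ["longName", "sector", "industry", "marketCap", "trailingPE"]
    if required_keys.all (fun k => d.contains k) then fixedMsg d
    else
      let lines := d.items.map (fun p => fmtLine p.1 p.2)
      -- itertools.accumulate(len(line)+1 for line in lines)
      let totals := ((lines.map (fun l => (l.length : Int) + 1)).scanl (· + ·) 0).tail
      -- n = sum(1 for t in totals if t <= max_length)
      let n := (totals.filter (fun t => t ≤ max_length)).length
      String.ofList (PySem.Chars.join ['\n'] (lines.take n))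

-- ===== PRECONDITION & SPEC =====
def Spec_message_creator (info : List (String × String)) (max_length : Int) (out : String) : Prop := out = message_creator_alt info max_length
instance (info : List (String × String)) (max_length : Int) (out : String) : Decidable (Spec_message_creator info max_length out) := by unfold Spec_message_creator; infer_instance

-- ===== CLAIM (what is proved, stated in full; the proofs are below) =====
def Claim_equal_message_creator : Prop := ∀ (info : List (String × String)) (max_length : Int), Dom_message_creator info max_length → Spec_message_creator info max_length (message_creator info max_length)

-- ===== LEMMAS AND PROOFS =====

-- running totals of increments, starting from c (proof-side mirror of accumulate)
def runTotals (c : Int) : List Int → List Int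
  | [] => []
  | L :: ls => (c + L) :: runTotals (c + L) ls

theorem scanl_eq_runTotals (ls : List Int) (c : Int) :
    List.scanl (· + ·) c ls = c :: runTotals c ls := by
  induction ls generalizing c with
  | nil => simp [runTotals, List.scanl]
  | cons L ls ih => simp [List.scanl_cons, runTotals, ih]

theorem runTotals_gt (ls : List Int) (c : Int) (hpos : ∀ x ∈ ls, 1 ≤ x) :
    ∀ y ∈ runTotals c ls, c < y := by
  induction ls generalizing c with
  | nil => simp [runTotals]
  | cons L ls ih =>
    intro y hy
    simp only [runTotals, List.mem_cons] at hy
    have hL : 1 ≤ L := hpos L (by simp)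
    rcases hy with rfl | hy
    · omega
    · have := ih (c + L) (fun x hx => hpos x (by simp [hx])) y hy
      omega

theorem loopA_eq_take (M : Int) (items : List (String × String))
    (acc : List (List Char)) (cur : Int) :
    loopA M items acc cur =
      acc ++ (items.map (fun p => fmtLine p.1 p.2)).take
        (((runTotals cur (items.map (fun p => ((fmtLine p.1 p.2).length : Int) + 1))).filter
            (fun t => t ≤ M)).length) := by
  induction items generalizing acc cur with
  | nil => simp [loopA, runTotals]
  | cons kv rest ih =>
    obtain ⟨k, v⟩ := kv
    simp only [loopA, List.map_cons, runTotals]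
    by_cases h : cur + ((fmtLine k v).length : Int) + 1 > M
    · rw [if_pos h]
      have hrest : ((runTotals (cur + (((fmtLine k v).length : Int) + 1))
          (rest.map (fun p => ((fmtLine p.1 p.2).length : Int) + 1))).filter
          (fun t => t ≤ M)) = [] := by
        rw [List.filter_eq_nil_iff]
        intro y hy
        have := runTotals_gt _ _ (by
          intro x hx
          simp only [List.mem_map] at hx
          obtain ⟨p, _, rfl⟩ := hx
          omega) y hy
        simp only [decide_eq_true_eq]
        omega
      have hhead : ¬ (cur + (((fmtLine k v).length : Int) + 1) ≤ M) := by omega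
      simp [hhead, hrest]
    · rw [if_neg h]
      rw [ih]
      have hhead : cur + (((fmtLine k v).length : Int) + 1) ≤ M := by omega
      simp only [List.filter_cons, decide_eq_true_eq, if_pos hhead, List.length_cons,
        List.take_succ_cons, List.append_assoc, List.cons_append, List.nil_append]
      have : cur + ((fmtLine k v).length : Int) + 1
          = cur + (((fmtLine k v).length : Int) + 1) := by ring
      rw [this]

-- ===== VERDICT (by name: the statement is the Claim_ definition above) =====
theorem message_creator_spec : Claim_equal_message_creator := by
  intro info max_length _
  unfold Spec_message_creator message_creator message_creator_alt
  by_cases h0 : info.isEmpty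
  · simp [h0]
  · simp only [h0, if_false, Bool.false_eq_true]
    by_cases h1 : (["longName", "sector", "industry", "marketCap", "trailingPE"]).all
        (fun k => (PySem.Dict.ofList info).contains k)
    · simp [h1]
    · simp only [h1, if_false, Bool.false_eq_true]
      congr 1
      congr 1
      rw [loopA_eq_take, List.nil_append]
      congr 1
      rw [List.map_map, scanl_eq_runTotals]
      rfl
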